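-- pv_equiv track=rewrite | github.com/mengjihua/Binary-Battle | 第 157 场双周赛/q2.py | maxSubstrings
-- ===== SOURCE A (Python) =====
-- def maxSubstrings(word: str) -> int:
--     # 求首尾相同, 且长度>= minlength, 并且不能相交的子字符串个数
--     n = len(word)
--     chr_map = [[] for _ in range(26)]
--     bound, ans = -1, 0
--     for r, c in enumerate(word):
--         if len(chr_map[ord(c) - ord('a')]) == 0:
--             chr_map[ord(c) - ord('a')].append(r)
--             continue
--         else:
--             idx = len(chr_map[ord(c) - ord('a')]) - 1
--             l = chr_map[ord(c) - ord('a')][idx]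
--         while l > bound and r - l < 3 and idx > 0:
--             idx -= 1
--             l = chr_map[ord(c) - ord('a')][idx]
--         if l > bound and r - l >= 3:
--             ans += 1
--             bound = r
--         chr_map[ord(c) - ord('a')].append(r)
--     return ans
-- ===== SOURCE B (Python) =====
-- def maxSubstrings(word: str) -> int:
--     # Greedy, one pass: a new substring can end at r iff its letter occurred
--     # at some position l with bound < l <= r-3; that holds iff the EARLIEST
--     # occurrence of the letter after the last counted end is <= r-3.  So keep
--     # only that earliest occurrence per letter and reset the table on a match.
--     lowercase = "abcdefghijklmnopqrstuvwxyz"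
--     first = [None] * 26
--     ans = 0
--     for r, c in enumerate(word):
--         i = lowercase.index(c)
--         p = first[i]
--         if p is not None and r - p >= 3:
--             ans += 1
--             first = [None] * 26
--         elif p is None:
--             first[i] = r
--     return ans
-- ===== Notes on version B (the rewrite author's own statement) =====
-- stated objective: simpler
-- what changed: A keeps the full, ever-growing list of occurrences per letter and scans it backwards with an inner while loop against the last counted bound; B keeps only the earliest still-usable occurrence per letter in a fixed 26-slot table that is cleared whenever a substring is counted, so the occurrence lists and the inner scan disappear.
-- outside the precondition, e.g. on maxSubstrings('xbb^'): A returns 1, B raises ValueError; on maxSubstrings('ab c'): A raises IndexError, B raises ValueError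
import Mathlib
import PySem

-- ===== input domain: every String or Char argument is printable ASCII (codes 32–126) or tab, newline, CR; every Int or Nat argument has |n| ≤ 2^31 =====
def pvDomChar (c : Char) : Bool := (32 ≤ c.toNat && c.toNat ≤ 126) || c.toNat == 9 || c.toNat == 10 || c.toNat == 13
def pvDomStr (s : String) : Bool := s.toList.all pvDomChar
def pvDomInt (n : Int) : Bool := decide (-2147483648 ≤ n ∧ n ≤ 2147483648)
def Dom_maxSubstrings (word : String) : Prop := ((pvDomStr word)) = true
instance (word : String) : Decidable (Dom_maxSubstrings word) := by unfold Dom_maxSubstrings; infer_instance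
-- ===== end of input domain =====

-- B replaces A's per-letter occurrence lists and backward while-scan by a single table
-- holding, per letter, only the earliest occurrence since the last counted match
-- (objective: simpler — no inner loop, O(1) state per letter).

-- ===== PORT A =====
-- A indexes chr_map with ord(c) - ord('a'); exact inside Pre_ (0 ≤ index < 26).
def pvBucket (c : Char) : Int := (c.toNat : Int) - 97

-- the while loop 'while l > bound and r - l < 3 and idx > 0: idx -= 1; l = chr_map[...][idx]'
-- (fuel = idx; the `.getD 0` arm is unreachable inside Pre_, where 0 ≤ idx < occ.length)
def pvScan (occ : List Int) (bound r : Int) : Nat → Int → Int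
  | 0, l => l
  | idx + 1, l =>
      if bound < l ∧ r - l < 3 then
        pvScan occ bound r idx ((PySem.List.pyGet? occ (idx : Int)).getD 0)
      else l

-- one iteration of A's 'for r, c in enumerate(word)' over state (chr_map, bound, ans);
-- chr_map[...].append(r) is List.set at the bucket (index valid inside Pre_)
def pvStepA (st : List (List Int) × Int × Int) (p : Int × Char) : List (List Int) × Int × Int :=
  let occ := (PySem.List.pyGet? st.1 (pvBucket p.2)).getD []
  if occ.length = 0 then
    (st.1.set (pvBucket p.2).toNat (occ ++ [p.1]), st.2.1, st.2.2)
  else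
    let l := pvScan occ st.2.1 p.1 (occ.length - 1)
      ((PySem.List.pyGet? occ ((occ.length : Int) - 1)).getD 0)
    if st.2.1 < l ∧ 3 ≤ p.1 - l then
      (st.1.set (pvBucket p.2).toNat (occ ++ [p.1]), p.1, st.2.2 + 1)
    else
      (st.1.set (pvBucket p.2).toNat (occ ++ [p.1]), st.2.1, st.2.2)

def maxSubstrings (word : String) : Int :=
  ((PySem.List.enumerate word.toList 0).foldl pvStepA (List.replicate 26 [], -1, 0)).2.2

-- ===== PORT B =====
def pvLower : List Char := "abcdefghijklmnopqrstuvwxyz".toList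

-- one iteration of B's loop over state (first, ans); lowercase.index(c) raises
-- ValueError on the `none` arm (outside Pre_), where the state is left unchanged
def pvStepB (st : List (Option Int) × Int) (p : Int × Char) : List (Option Int) × Int :=
  match PySem.List.index? pvLower p.2 with
  | none => st
  | some i =>
    match st.1.getD i none with
    | some v => if 3 ≤ p.1 - v then (List.replicate 26 none, st.2 + 1) else st
    | none => (st.1.set i (some p.1), st.2)

def maxSubstrings_alt (word : String) : Int :=
  ((PySem.List.enumerate word.toList 0).foldl pvStepB (List.replicate 26 none, 0)).2

-- ===== PRECONDITION & SPEC =====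
-- Pre_ restricts to lowercase letters (the function's natural domain): on any other
-- character A raises IndexError, except codes 71–96 where Python's negative-index
-- wraparound makes A return a value from another letter's bucket — B raises ValueError
-- on every non-lowercase character, so those inputs are excluded too.
def Pre_maxSubstrings (word : String) : Prop :=
  word.toList.all (fun c => 97 ≤ c.toNat && c.toNat ≤ 122) = true
instance (word : String) : Decidable (Pre_maxSubstrings word) := by
  unfold Pre_maxSubstrings; infer_instance
def pvWitness_maxSubstrings : String := "abca"

def Spec_maxSubstrings (word : String) (out : Int) : Prop := out = maxSubstrings_alt word
instance (word : String) (out : Int) : Decidable (Spec_maxSubstrings word out) := by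
  unfold Spec_maxSubstrings; infer_instance

-- ===== CLAIM (what is proved, stated in full; the proofs are below) =====
def Claim_equal_maxSubstrings : Prop :=
  ∀ (word : String), Dom_maxSubstrings word → Pre_maxSubstrings word →
    Spec_maxSubstrings word (maxSubstrings word)

-- ===== LEMMAS AND PROOFS =====

-- the simulation invariant: per bucket j, A's list m[j] is strictly increasing with
-- entries in [0, n), and B's table entry is the earliest entry of m[j] beyond bound
def pvInv (n : Nat) (m : List (List Int)) (bound : Int) (first : List (Option Int)) : Prop :=
  m.length = 26 ∧ first.length = 26 ∧ bound < (n : Int) ∧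
  ∀ j : Nat, j < 26 →
    List.Pairwise (· < ·) (m.getD j []) ∧
    (∀ l ∈ m.getD j [], 0 ≤ l ∧ l < (n : Int)) ∧
    first.getD j none = ((m.getD j []).filter (fun l => decide (bound < l))).head?

-- lowercase character facts, decided over the 26 cases
theorem pvIndexAll : ∀ k : Fin 26,
    PySem.List.index? pvLower (Char.ofNat (97 + (k : Nat))) = some (k : Nat) := by decide

theorem pvIndexLower (c : Char) (h1 : 97 ≤ c.toNat) (h2 : c.toNat ≤ 122) :
    PySem.List.index? pvLower c = some (c.toNat - 97) := by
  have hk : c.toNat - 97 < 26 := by omega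
  have hc : Char.ofNat (97 + (c.toNat - 97)) = c := by
    have : 97 + (c.toNat - 97) = c.toNat := by omega
    rw [this, Char.ofNat_toNat]
  have := pvIndexAll ⟨c.toNat - 97, hk⟩
  simpa [hc] using this

-- the while loop finds an admissible occurrence iff one exists at or below idx
theorem pvScan_spec (occ : List Int) (bound r : Int)
    (hpw : List.Pairwise (· < ·) occ) :
    ∀ (idx : Nat) (hidx : idx < occ.length),
      (bound < pvScan occ bound r idx (occ[idx]'hidx) ∧
        3 ≤ r - pvScan occ bound r idx (occ[idx]'hidx))
      ↔ ∃ (j : Nat) (hj : j < occ.length), j ≤ idx ∧ bound < occ[j]'hj ∧ occ[j]'hj + 3 ≤ r := by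
  have hmono := List.pairwise_iff_getElem.mp hpw
  intro idx
  induction idx with
  | zero =>
    intro hidx
    simp only [pvScan]
    constructor
    · rintro ⟨h1, h2⟩; exact ⟨0, hidx, le_refl 0, h1, by omega⟩
    · rintro ⟨j, hj, hle, hb, hr⟩
      have : j = 0 := by omega
      subst this; exact ⟨hb, by omega⟩
  | succ idx ih =>
    intro hidx
    have hidx' : idx < occ.length := by omega
    have hget : (PySem.List.pyGet? occ (idx : Int)).getD 0 = occ[idx]'hidx' := by
      rw [PySem.List.pyGet?_natCast]
      simp [List.getElem?_eq_getElem hidx']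
    simp only [pvScan, hget]
    split_ifs with hcond
    · rw [ih hidx']
      constructor
      · rintro ⟨j, hj, hle, hb, hr⟩; exact ⟨j, hj, by omega, hb, hr⟩
      · rintro ⟨j, hj, hle, hb, hr⟩
        rcases Nat.lt_or_ge j (idx + 1) with hlt | hge
        · exact ⟨j, hj, by omega, hb, hr⟩
        · have : j = idx + 1 := by omega
          subst this; omega
    · push Not at hcond
      constructor
      · rintro ⟨h1, h2⟩; exact ⟨idx + 1, hidx, le_refl _, h1, by omega⟩
      · rintro ⟨j, hj, hle, hb, hr⟩
        have hbnd : bound < occ[idx + 1]'hidx := by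
          rcases Nat.lt_or_ge j (idx + 1) with hlt | hge
          · have := hmono j (idx + 1) hj hidx hlt
            omega
          · have : j = idx + 1 := by omega
            subst this; exact hb
        exact ⟨hbnd, by have := hcond hbnd; omega⟩

-- head of the filtered list: none iff nothing beyond bound …
theorem pvFilterNone (occ : List Int) (bound : Int) :
    (occ.filter (fun l => decide (bound < l))).head? = none ↔ ∀ l ∈ occ, l ≤ bound := by
  rw [List.head?_eq_none_iff, List.filter_eq_nil_iff]
  constructor
  · intro h l hl; have := h l hl; simpa using by
      by_contra hc; exact absurd (by simpa using (h l hl)) (by omega)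
  · intro h l hl; simpa using by have := h l hl; omega

-- … and when some, it is the minimum element beyond bound
theorem pvFilterSome (occ : List Int) (bound : Int) (p : Int)
    (hpw : List.Pairwise (· < ·) occ)
    (h : (occ.filter (fun l => decide (bound < l))).head? = some p) :
    bound < p ∧ p ∈ occ ∧ ∀ l ∈ occ, bound < l → p ≤ l := by
  rcases hf : occ.filter (fun l => decide (bound < l)) with _ | ⟨q, t⟩
  · rw [hf] at h; simp at h
  · rw [hf] at h
    simp only [List.head?_cons, Option.some.injEq] at h
    have h' : p = q := h.symm
    subst h'
    have hpmem : p ∈ occ.filter (fun l => decide (bound < l)) := by rw [hf]; simp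
    have hpocc : p ∈ occ := List.mem_of_mem_filter hpmem
    have hbp : bound < p := by simpa using List.of_mem_filter hpmem
    refine ⟨hbp, hpocc, ?_⟩
    intro l hl hbl
    have hlf : l ∈ occ.filter (fun l => decide (bound < l)) := by
      apply List.mem_filter.mpr ⟨hl, by simpa using hbl⟩
    rw [hf] at hlf
    rcases List.mem_cons.mp hlf with rfl | hlt
    · exact le_refl _
    · have hpwf : (occ.filter (fun l => decide (bound < l))).Pairwise (· < ·) :=
        List.Pairwise.filter _ hpw
      rw [hf] at hpwf
      have := (List.pairwise_cons.mp hpwf).1 l hlt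
      omega

-- getD after set, both indices in range
theorem pv_getD_set {α : Type} (l : List α) (k j : Nat) (v d : α) (hk : k < l.length) :
    (l.set k v).getD j d = if j = k then v else l.getD j d := by
  rcases eq_or_ne j k with rfl | hne
  · simp [List.getD_eq_getElem?_getD, hk]
  · simp [List.getD_eq_getElem?_getD, Ne.symm hne, hne]

-- one loop iteration of A and of B from related states: equal counters, related states
theorem pvStep_sim (n : Nat) (m : List (List Int)) (bound ans : Int)
    (first : List (Option Int)) (c : Char)
    (h1 : 97 ≤ c.toNat) (h2 : c.toNat ≤ 122) (hinv : pvInv n m bound first) :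
    ∃ m' bound' first' a',
      pvStepA (m, bound, ans) ((n : Int), c) = (m', bound', a') ∧
      pvStepB (first, ans) ((n : Int), c) = (first', a') ∧
      pvInv (n + 1) m' bound' first' := by
  obtain ⟨hm, hfst, hbn, hjall⟩ := hinv
  have hk26 : c.toNat - 97 < 26 := by omega
  have hbucket : pvBucket c = ((c.toNat - 97 : Nat) : Int) := by
    unfold pvBucket; omega
  have hbt : (pvBucket c).toNat = c.toNat - 97 := by rw [hbucket]; simp
  have hocc : (PySem.List.pyGet? m (pvBucket c)).getD [] = m.getD (c.toNat - 97) [] := by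
    rw [hbucket, PySem.List.pyGet?_natCast, List.getD_eq_getElem?_getD]
  obtain ⟨hpw, hels, hfeq⟩ := hjall (c.toNat - 97) hk26
  have hkm : c.toNat - 97 < m.length := by omega
  have hkf : c.toNat - 97 < first.length := by omega
  have hFget : first.getD (c.toNat - 97) none
      = ((m.getD (c.toNat - 97) []).filter (fun l => decide (bound < l))).head? := hfeq
  have hidx := pvIndexLower c h1 h2
  -- the invariant for a bucket j ≠ k is untouched by the update
  have hother : ∀ (v : List Int) (j : Nat), j < 26 → j ≠ c.toNat - 97 →
      (m.set (c.toNat - 97) v).getD j [] = m.getD j [] := by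
    intro v j hj hne
    rw [pv_getD_set m _ _ _ _ hkm]; simp [hne]
  have hself : ∀ (v : List Int),
      (m.set (c.toNat - 97) v).getD (c.toNat - 97) [] = v := by
    intro v; rw [pv_getD_set m _ _ _ _ hkm]; simp
  by_cases hemp : (m.getD (c.toNat - 97) []).length = 0
  · -- empty bucket: A appends and continues, B records the first occurrence
    have hocce : m.getD (c.toNat - 97) [] = [] := List.eq_nil_of_length_eq_zero hemp
    have hBn : first.getD (c.toNat - 97) none = none := by rw [hFget, hocce]; simp
    refine ⟨m.set (c.toNat - 97) [(n : Int)], bound, first.set (c.toNat - 97) (some (n : Int)),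
      ans, ?_, ?_, ?_⟩
    · simp only [pvStepA, hocc, hocce, hbt]; simp
    · simp only [pvStepB, hidx, hBn]
    · refine ⟨by simpa using hm, by simpa using hfst, by push_cast; omega, ?_⟩
      intro j hj
      rcases eq_or_ne j (c.toNat - 97) with rfl | hne
      · rw [hself]
        rw [pv_getD_set first _ _ _ _ hkf]
        refine ⟨by simp, ?_, ?_⟩
        · intro l hl; simp at hl; subst hl; exact ⟨by positivity, by push_cast; omega⟩
        · simp [hbn]
      · rw [hother _ j hj hne]
        rw [pv_getD_set first _ _ _ _ hkf]
        obtain ⟨hpwj, helsj, hfj⟩ := hjall j hj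
        exact ⟨hpwj, fun l hl => ⟨(helsj l hl).1, by have := (helsj l hl).2; push_cast; omega⟩,
          by rw [if_neg hne]; exact hfj⟩
  · -- nonempty bucket: A scans backward; characterize the scan by pvScan_spec
    have hlen1 : 1 ≤ (m.getD (c.toNat - 97) []).length := by omega
    have hlt : (m.getD (c.toNat - 97) []).length - 1 < (m.getD (c.toNat - 97) []).length := by omega
    have hlastidx : ((m.getD (c.toNat - 97) []).length : Int) - 1
        = (((m.getD (c.toNat - 97) []).length - 1 : Nat) : Int) := by omega
    have hlast : (PySem.List.pyGet? (m.getD (c.toNat - 97) [])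
          (((m.getD (c.toNat - 97) []).length : Int) - 1)).getD 0
        = (m.getD (c.toNat - 97) [])[(m.getD (c.toNat - 97) []).length - 1]'hlt := by
      rw [hlastidx, PySem.List.pyGet?_natCast, List.getElem?_eq_getElem hlt, Option.getD_some]
    have hspec := pvScan_spec (m.getD (c.toNat - 97) []) bound (n : Int) hpw
      ((m.getD (c.toNat - 97) []).length - 1) hlt
    have hcond : (bound < pvScan (m.getD (c.toNat - 97) []) bound (n : Int)
          ((m.getD (c.toNat - 97) []).length - 1)
          ((PySem.List.pyGet? (m.getD (c.toNat - 97) [])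
            (((m.getD (c.toNat - 97) []).length : Int) - 1)).getD 0) ∧
        3 ≤ (n : Int) - pvScan (m.getD (c.toNat - 97) []) bound (n : Int)
          ((m.getD (c.toNat - 97) []).length - 1)
          ((PySem.List.pyGet? (m.getD (c.toNat - 97) [])
            (((m.getD (c.toNat - 97) []).length : Int) - 1)).getD 0))
        ↔ ∃ (j : Nat) (hj : j < (m.getD (c.toNat - 97) []).length),
            bound < (m.getD (c.toNat - 97) [])[j]'hj ∧ (m.getD (c.toNat - 97) [])[j]'hj + 3 ≤ (n : Int) := by
      rw [hlast, hspec]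
      constructor
      · rintro ⟨j, hj, _, hb, hr⟩; exact ⟨j, hj, hb, hr⟩
      · rintro ⟨j, hj, hb, hr⟩; exact ⟨j, hj, by omega, hb, hr⟩
    rcases hF : ((m.getD (c.toNat - 97) []).filter (fun l => decide (bound < l))).head? with _ | p
    · -- nothing beyond bound: neither side counts; B records nothing (entry still none)
      have hall : ∀ l ∈ m.getD (c.toNat - 97) [], l ≤ bound := (pvFilterNone _ _).mp hF
      have hnc : ¬ ∃ (j : Nat) (hj : j < (m.getD (c.toNat - 97) []).length),
          bound < (m.getD (c.toNat - 97) [])[j]'hj ∧ (m.getD (c.toNat - 97) [])[j]'hj + 3 ≤ (n : Int) := by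
        rintro ⟨j, hj, hb, -⟩
        exact absurd (hall _ (List.getElem_mem hj)) (by omega)
      refine ⟨m.set (c.toNat - 97) (m.getD (c.toNat - 97) [] ++ [(n : Int)]), bound,
        first.set (c.toNat - 97) (some (n : Int)), ans, ?_, ?_, ?_⟩
      · simp only [pvStepA, hocc, hbt]
        rw [if_neg hemp, if_neg (by rw [hcond]; exact hnc)]
      · simp only [pvStepB, hidx, hFget, hF]
      · refine ⟨by simpa using hm, by simpa using hfst, by push_cast; omega, ?_⟩
        intro j hj
        rcases eq_or_ne j (c.toNat - 97) with rfl | hne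
        · rw [hself, pv_getD_set first _ _ _ _ hkf]
          refine ⟨?_, ?_, ?_⟩
          · rw [List.pairwise_append]
            exact ⟨hpw, by simp, fun a ha b hb => by simp at hb; subst hb; exact (hels a ha).2⟩
          · intro l hl
            rcases List.mem_append.mp hl with hl | hl
            · exact ⟨(hels l hl).1, by have := (hels l hl).2; push_cast; omega⟩
            · simp at hl; subst hl; exact ⟨by positivity, by push_cast; omega⟩
          · have hfe : (m.getD (c.toNat - 97) []).filter (fun l => decide (bound < l)) = [] := by
              rw [List.filter_eq_nil_iff]; intro a ha; simpa using by have := hall a ha; omega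
            rw [List.filter_append, hfe, List.nil_append]
            simp [hbn]
        · rw [hother _ j hj hne, pv_getD_set first _ _ _ _ hkf]
          obtain ⟨hpwj, helsj, hfj⟩ := hjall j hj
          exact ⟨hpwj, fun l hl => ⟨(helsj l hl).1, by have := (helsj l hl).2; push_cast; omega⟩,
            by rw [if_neg hne]; exact hfj⟩
    · -- earliest occurrence beyond bound is p
      obtain ⟨hbp, hpmem, hpmin⟩ := pvFilterSome _ _ _ hpw hF
      by_cases hcnt : 3 ≤ (n : Int) - p
      · -- both count: bound moves to n, B clears the table
        have hc : ∃ (j : Nat) (hj : j < (m.getD (c.toNat - 97) []).length),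
            bound < (m.getD (c.toNat - 97) [])[j]'hj ∧ (m.getD (c.toNat - 97) [])[j]'hj + 3 ≤ (n : Int) := by
          obtain ⟨j, hj, hjp⟩ := List.mem_iff_getElem.mp hpmem
          exact ⟨j, hj, by rw [hjp]; exact hbp, by rw [hjp]; omega⟩
        refine ⟨m.set (c.toNat - 97) (m.getD (c.toNat - 97) [] ++ [(n : Int)]), (n : Int),
          List.replicate 26 none, ans + 1, ?_, ?_, ?_⟩
        · simp only [pvStepA, hocc, hbt]
          rw [if_neg hemp, if_pos (by rw [hcond]; exact hc)]
        · simp only [pvStepB, hidx, hFget, hF]; rw [if_pos hcnt]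
        · refine ⟨by simpa using hm, by simp, by push_cast; omega, ?_⟩
          intro j hj
          have hnonej : (List.replicate 26 (none : Option Int)).getD j none = none := by
            rw [List.getD_eq_getElem?_getD, List.getElem?_replicate]
            rw [if_pos hj, Option.getD_some]
          rcases eq_or_ne j (c.toNat - 97) with rfl | hne
          · rw [hself, hnonej]
            refine ⟨?_, ?_, ?_⟩
            · rw [List.pairwise_append]
              exact ⟨hpw, by simp, fun a ha b hb => by simp at hb; subst hb; exact (hels a ha).2⟩
            · intro l hl
              rcases List.mem_append.mp hl with hl | hl
              · exact ⟨(hels l hl).1, by have := (hels l hl).2; push_cast; omega⟩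
              · simp at hl; subst hl; exact ⟨by positivity, by push_cast; omega⟩
            · have h1' : (m.getD (c.toNat - 97) []).filter (fun l => decide ((n : Int) < l)) = [] := by
                rw [List.filter_eq_nil_iff]; intro a ha
                simpa using by have := (hels a ha).2; omega
              rw [List.filter_append, h1', List.nil_append]
              simp
          · rw [hother _ j hj hne, hnonej]
            obtain ⟨hpwj, helsj, hfj⟩ := hjall j hj
            refine ⟨hpwj, fun l hl => ⟨(helsj l hl).1, by have := (helsj l hl).2; push_cast; omega⟩, ?_⟩
            have hfe : (m.getD j []).filter (fun l => decide ((n : Int) < l)) = [] := by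
              rw [List.filter_eq_nil_iff]; intro a ha
              simpa using by have := (helsj a ha).2; omega
            rw [hfe]; rfl
      · -- earliest occurrence too close: neither side counts, B keeps its entry
        have hnc : ¬ ∃ (j : Nat) (hj : j < (m.getD (c.toNat - 97) []).length),
            bound < (m.getD (c.toNat - 97) [])[j]'hj ∧ (m.getD (c.toNat - 97) [])[j]'hj + 3 ≤ (n : Int) := by
          rintro ⟨j, hj, hb, hr⟩
          have := hpmin _ (List.getElem_mem hj) hb
          omega
        refine ⟨m.set (c.toNat - 97) (m.getD (c.toNat - 97) [] ++ [(n : Int)]), bound,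
          first, ans, ?_, ?_, ?_⟩
        · simp only [pvStepA, hocc, hbt]
          rw [if_neg hemp, if_neg (by rw [hcond]; exact hnc)]
        · simp only [pvStepB, hidx, hFget, hF]; rw [if_neg hcnt]
        · refine ⟨by simpa using hm, hfst, by push_cast; omega, ?_⟩
          intro j hj
          rcases eq_or_ne j (c.toNat - 97) with rfl | hne
          · rw [hself]
            refine ⟨?_, ?_, ?_⟩
            · rw [List.pairwise_append]
              exact ⟨hpw, by simp, fun a ha b hb => by simp at hb; subst hb; exact (hels a ha).2⟩
            · intro l hl
              rcases List.mem_append.mp hl with hl | hl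
              · exact ⟨(hels l hl).1, by have := (hels l hl).2; push_cast; omega⟩
              · simp at hl; subst hl; exact ⟨by positivity, by push_cast; omega⟩
            · rw [hFget, hF, List.filter_append]
              rcases hft : (m.getD (c.toNat - 97) []).filter (fun l => decide (bound < l)) with _ | ⟨q, t⟩
              · rw [hft] at hF; simp at hF
              · rw [hft] at hF; simp at hF; simp [hF]
          · rw [hother _ j hj hne]
            obtain ⟨hpwj, helsj, hfj⟩ := hjall j hj
            exact ⟨hpwj, fun l hl => ⟨(helsj l hl).1, by have := (helsj l hl).2; push_cast; omega⟩, hfj⟩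

-- the two folds agree from any pair of related states
theorem pvRun (cs : List Char) : ∀ (n : Nat) (m : List (List Int)) (bound ans : Int)
    (first : List (Option Int)),
    (∀ c ∈ cs, 97 ≤ c.toNat ∧ c.toNat ≤ 122) → pvInv n m bound first →
    ((PySem.List.enumerate cs (n : Int)).foldl pvStepA (m, bound, ans)).2.2
      = ((PySem.List.enumerate cs (n : Int)).foldl pvStepB (first, ans)).2 := by
  induction cs with
  | nil => intro n m bound ans first _ _; simp [PySem.List.enumerate_nil]
  | cons c cs ih =>
    intro n m bound ans first hlc hinv
    obtain ⟨m', bound', first', a', hA, hB, hinv'⟩ :=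
      pvStep_sim n m bound ans first c (hlc c (by simp)).1 (hlc c (by simp)).2 hinv
    rw [PySem.List.enumerate_cons, List.foldl_cons, List.foldl_cons, hA, hB]
    have hc : (n : Int) + 1 = ((n + 1 : Nat) : Int) := by push_cast; ring
    rw [hc]
    exact ih (n + 1) m' bound' a' first' (fun x hx => hlc x (by simp [hx])) hinv'

-- the initial states are related
theorem pvInv_init : pvInv 0 (List.replicate 26 []) (-1) (List.replicate 26 none) := by
  refine ⟨by simp, by simp, by norm_num, ?_⟩
  intro j hj
  have hg : (List.replicate 26 ([] : List Int)).getD j [] = [] := by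
    rw [List.getD_eq_getElem?_getD, List.getElem?_replicate, if_pos hj, Option.getD_some]
  have hg' : (List.replicate 26 (none : Option Int)).getD j none = none := by
    rw [List.getD_eq_getElem?_getD, List.getElem?_replicate, if_pos hj, Option.getD_some]
  rw [hg, hg']
  exact ⟨by simp, by simp, by simp⟩

-- ===== VERDICT (by name: the statement is the Claim_ definition above) =====
theorem maxSubstrings_spec : Claim_equal_maxSubstrings := by
  unfold Claim_equal_maxSubstrings
  intro word _ hpre
  unfold Spec_maxSubstrings maxSubstrings maxSubstrings_alt
  have h0 : (0 : Int) = ((0 : Nat) : Int) := rfl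
  rw [h0]
  refine pvRun word.toList 0 _ _ _ _ ?_ pvInv_init
  intro c hc
  simpa using List.all_eq_true.mp hpre c hc
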